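-- pv_equiv track=rewrite | github.com/martijnbentum/bg-nemo-glowing-fortnight | manifest.py | _find_string_ranges
-- ===== SOURCE A (Python) =====
-- def _find_string_ranges(sorted_strings):
--     """
--     Given a sorted list of strings, return a dict mapping each unique string
--     to its (start_index, end_index) in the list (end is exclusive).
--     """
--     ranges = {}
--     if not sorted_strings:
--         return ranges
--
--     start = 0
--     current = sorted_strings[0]
--
--     for i, s in enumerate(sorted_strings[1:], start=1):
--         if s != current:
--             ranges[current] = (start, i)
--             start = i
--             current = s
--
--     # add the last group
--     ranges[current] = (start, len(sorted_strings))
--     return ranges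
-- ===== SOURCE B (Python) =====
-- def _find_string_ranges(sorted_strings):
--     """
--     Given a sorted list of strings, return a dict mapping each unique string
--     to its (start_index, end_index) in the list (end is exclusive).
--     """
--     n = len(sorted_strings)
--     starts = [i for i in range(n)
--               if i == 0 or sorted_strings[i] != sorted_strings[i - 1]]
--     return {sorted_strings[b]: (b, e) for b, e in zip(starts, starts[1:] + [n])}
-- ===== Notes on version B (the rewrite author's own statement) =====
-- stated objective: alternative
-- what changed: Replaces the stateful single pass that tracks current/start and flushes a pending group on change (plus a final-group insert) with two staged passes: first a comprehension collects all run-start boundary indices, then the dict is built in one comprehension by pairing each boundary with the next (appending n), so no current/start accumulator or pending group exists.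
import Mathlib
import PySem

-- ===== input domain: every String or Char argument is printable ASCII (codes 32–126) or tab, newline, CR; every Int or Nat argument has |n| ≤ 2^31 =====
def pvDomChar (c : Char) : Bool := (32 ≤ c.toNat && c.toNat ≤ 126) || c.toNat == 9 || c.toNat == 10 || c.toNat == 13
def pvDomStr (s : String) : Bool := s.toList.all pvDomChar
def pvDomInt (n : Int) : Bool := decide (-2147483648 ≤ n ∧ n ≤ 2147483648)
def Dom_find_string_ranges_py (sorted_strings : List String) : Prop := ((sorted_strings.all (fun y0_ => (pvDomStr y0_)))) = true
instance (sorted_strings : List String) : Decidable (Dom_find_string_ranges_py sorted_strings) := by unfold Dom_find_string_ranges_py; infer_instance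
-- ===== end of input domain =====

-- B replaces A's stateful flush-on-change pass with two staged passes: collect all run-start
-- boundary indices, then pair consecutive boundaries into the dict (alternative, same O(n) cost).

-- ===== PORT A =====
-- A: empty check, then fold over enumerate(sorted_strings[1:], start=1) carrying (ranges, start, current),
-- then the final-group insert with len(sorted_strings).  (sorted_strings[1:] of s0 :: rest is rest.)
def find_string_ranges_py (sorted_strings : List String) : List (String × Int × Int) :=
  match sorted_strings with
  | [] => (PySem.Dict.empty : PySem.Dict String (Int × Int)).items
  | s0 :: rest =>
    let st :=
      (PySem.List.enumerate rest 1).foldl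
        (fun (acc : PySem.Dict String (Int × Int) × Int × String) (p : Int × String) =>
          if p.2 ≠ acc.2.2 then (acc.1.insert acc.2.2 (acc.2.1, p.1), p.1, p.2) else acc)
        ((PySem.Dict.empty : PySem.Dict String (Int × Int)), (0 : Int), s0)
    (st.1.insert st.2.2 (st.2.1, ((s0 :: rest).length : Int))).items

-- ===== PORT B =====
-- B-side helper: the boundary comprehension [i for i in range(n) if i == 0 or l[i] != l[i-1]]
-- (short-circuit 'or' means l[i-1] is only read for i ≥ 1, where Nat's i-1 agrees with Python's).
def pvStarts (l : List String) : List Nat :=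
  (List.range l.length).filter (fun i => i == 0 || !(l.getD i "" == l.getD (i - 1) ""))

-- the dict comprehension over zip(starts, starts[1:] + [n]) (insertion order, overwrite in place)
def find_string_ranges_py_alt (sorted_strings : List String) : List (String × Int × Int) :=
  (((pvStarts sorted_strings).zip ((pvStarts sorted_strings).tail ++ [sorted_strings.length])).foldl
    (fun (d : PySem.Dict String (Int × Int)) (p : Nat × Nat) =>
      d.insert (sorted_strings.getD p.1 "") ((p.1 : Int), (p.2 : Int)))
    PySem.Dict.empty).items

-- ===== PRECONDITION & SPEC =====
def Spec_find_string_ranges_py (sorted_strings : List String) (out : List (String × Int × Int)) : Prop := out = find_string_ranges_py_alt sorted_strings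
instance (sorted_strings : List String) (out : List (String × Int × Int)) : Decidable (Spec_find_string_ranges_py sorted_strings out) := by unfold Spec_find_string_ranges_py; infer_instance

-- ===== CLAIM (what is proved, stated in full; the proofs are below) =====
def Claim_equal_find_string_ranges_py : Prop := ∀ (sorted_strings : List String), Dom_find_string_ranges_py sorted_strings → Spec_find_string_ranges_py sorted_strings (find_string_ranges_py sorted_strings)

-- ===== LEMMAS AND PROOFS =====

-- Common reference shape both ports are reduced to: fold over the maximal runs of equal
-- adjacent elements, carrying only the offset.
def runFold (d : PySem.Dict String (Int × Int)) (off : Int) :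
    List String → PySem.Dict String (Int × Int)
  | [] => d
  | c :: t =>
    runFold (d.insert c (off, off + 1 + ((t.takeWhile (fun x => x = c)).length : Int)))
      (off + 1 + ((t.takeWhile (fun x => x = c)).length : Int))
      (t.dropWhile (fun x => x = c))
termination_by xs => xs.length
decreasing_by
  have := List.length_dropWhile_le (fun x => x = c) t
  simpa using Nat.lt_succ_of_le this

-- A's loop, written as structural recursion on the remaining suffix.
def loopA (d : PySem.Dict String (Int × Int)) (st : Int) (cur : String) (i : Int) :
    List String → PySem.Dict String (Int × Int)
  | [] => d.insert cur (st, i)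
  | x :: xs =>
    if x ≠ cur then loopA (d.insert cur (st, i)) i x (i + 1) xs
    else loopA d st cur (i + 1) xs

theorem foldA_eq_loopA (xs : List String) (d : PySem.Dict String (Int × Int)) (st : Int)
    (cur : String) (i : Int) :
    (let r :=
      (PySem.List.enumerate xs i).foldl
        (fun (acc : PySem.Dict String (Int × Int) × Int × String) (p : Int × String) =>
          if p.2 ≠ acc.2.2 then (acc.1.insert acc.2.2 (acc.2.1, p.1), p.1, p.2) else acc)
        (d, st, cur)
     r.1.insert r.2.2 (r.2.1, i + (xs.length : Int))) = loopA d st cur i xs := by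
  induction xs generalizing d st cur i with
  | nil => simp [PySem.List.enumerate_nil, loopA]
  | cons x t ih =>
    rw [PySem.List.enumerate_cons]
    simp only [List.foldl_cons, List.length_cons]
    have hlen : i + ((t.length + 1 : Nat) : Int) = (i + 1) + (t.length : Int) := by
      push_cast; ring
    rw [hlen, loopA]
    by_cases hx : x = cur
    · rw [if_neg (by simp [hx]), if_neg (by simp [hx])]
      exact ih d st cur (i + 1)
    · rw [if_pos (by simp [hx]), if_pos (by simp [hx])]
      exact ih (d.insert cur (st, i)) i x (i + 1)

theorem loopA_eq_runFold (xs : List String) (d : PySem.Dict String (Int × Int)) (st : Int)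
    (cur : String) (k : Nat) :
    loopA d st cur (st + (k : Int)) xs =
      runFold (d.insert cur (st, st + (k : Int) + ((xs.takeWhile (fun x => x = cur)).length : Int)))
        (st + (k : Int) + ((xs.takeWhile (fun x => x = cur)).length : Int))
        (xs.dropWhile (fun x => x = cur)) := by
  induction xs generalizing d st cur k with
  | nil => simp [loopA, runFold]
  | cons x t ih =>
    by_cases hx : x = cur
    · subst hx
      rw [loopA, if_neg (by simp)]
      simp only [List.takeWhile_cons, List.dropWhile_cons, decide_true, if_true, List.length_cons]
      have h1 : st + (k : Int) + 1 = st + ((k + 1 : Nat) : Int) := by push_cast; ring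
      rw [h1, ih]
      have h2 : ∀ (m : Nat), st + ((k + 1 : Nat) : Int) + (m : Int)
          = st + (k : Int) + ((m + 1 : Nat) : Int) := by
        intro m; push_cast; ring
      rw [h2]
    · rw [loopA, if_pos (by simp [hx])]
      have hd : (decide (x = cur)) = false := by simp [hx]
      simp only [List.takeWhile_cons, List.dropWhile_cons, hd]
      have h1 : st + (k : Int) + 1 = (st + (k : Int)) + ((1 : Nat) : Int) := by push_cast; ring
      rw [h1, ih]
      simp [runFold]

theorem dropWhile_eq_drop_len (p : String → Bool) (xs : List String) :
    xs.dropWhile p = xs.drop (xs.takeWhile p).length := by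
  induction xs with
  | nil => simp
  | cons x t ih =>
    by_cases hp : p x
    · simp [List.takeWhile_cons, hp, ih]
    · simp [List.takeWhile_cons, hp]

-- B side: boundary indices of c :: t, with the comparison anchored at the head.
def pvAux (c : String) (t : List String) : List Nat :=
  (List.range t.length).filter (fun i => !(t.getD i "" == (c :: t).getD i ""))

theorem pvStarts_cons (c : String) (t : List String) :
    pvStarts (c :: t) = 0 :: (pvAux c t).map (· + 1) := by
  unfold pvStarts pvAux
  rw [List.length_cons, List.range_succ_eq_map, List.filter_cons]
  rw [if_pos (by simp)]
  rw [List.filter_map]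
  have hf : (List.range t.length).filter
      ((fun i => i == 0 || !((c :: t).getD i "" == (c :: t).getD (i - 1) "")) ∘ Nat.succ)
      = (List.range t.length).filter (fun i => !(t.getD i "" == (c :: t).getD i "")) := by
    apply List.filter_congr
    intro i _
    simp [Function.comp, List.getD_cons_succ]
  rw [hf]

theorem pvAux_cons (c x : String) (xs : List String) :
    pvAux c (x :: xs) = (if x = c then [] else [0]) ++ (pvAux x xs).map (· + 1) := by
  unfold pvAux
  rw [List.length_cons, List.range_succ_eq_map, List.filter_cons]
  have hf : (List.range xs.length).filter
      ((fun i => !((x :: xs).getD i "" == (c :: x :: xs).getD i "")) ∘ Nat.succ)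
      = (List.range xs.length).filter (fun i => !(xs.getD i "" == (x :: xs).getD i "")) := by
    apply List.filter_congr
    intro i _
    simp [Function.comp, List.getD_cons_succ]
  rw [List.filter_map, hf]
  by_cases hx : x = c
  · rw [if_neg (by simp [hx]), if_pos hx]
    rfl
  · rw [if_pos (by simp [hx]), if_neg hx]
    rfl

theorem pvAux_eq (c : String) (t : List String) :
    pvAux c t = (pvStarts (t.dropWhile (fun x => x = c))).map
      (· + (t.takeWhile (fun x => x = c)).length) := by
  induction t generalizing c with
  | nil => simp [pvAux, pvStarts]
  | cons x xs ih =>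
    rw [pvAux_cons]
    by_cases hx : x = c
    · subst hx
      simp only [List.takeWhile_cons, List.dropWhile_cons, decide_true, if_true,
        List.length_cons, if_pos rfl, List.nil_append]
      rw [ih x, List.map_map]
      apply List.map_congr_left
      intro a _
      simp only [Function.comp_apply]
      omega
    · have hd : (decide (x = c)) = false := by simp [hx]
      simp only [List.takeWhile_cons, List.dropWhile_cons, hd, if_neg hx,
        Bool.false_eq_true, if_false, List.length_nil]
      rw [pvStarts_cons x xs]
      simp

theorem pvStarts_runs (c : String) (t : List String) :
    pvStarts (c :: t) = 0 :: (pvStarts (t.dropWhile (fun x => x = c))).map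
      (· + ((t.takeWhile (fun x => x = c)).length + 1)) := by
  rw [pvStarts_cons, pvAux_eq, List.map_map]
  refine congrArg (0 :: ·) ?_
  apply List.map_congr_left
  intro a _
  simp only [Function.comp_apply]
  omega

theorem getD_shift (c : String) (t : List String) (i : Nat) :
    (c :: t).getD (i + ((t.takeWhile (fun x => x = c)).length + 1)) ""
      = (t.dropWhile (fun x => x = c)).getD i "" := by
  rw [dropWhile_eq_drop_len]
  have h1 : i + ((t.takeWhile (fun x => x = c)).length + 1)
      = ((t.takeWhile (fun x => x = c)).length + i) + 1 := by omega
  rw [h1, List.getD_cons_succ]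
  simp [List.getD_eq_getElem?_getD, List.getElem?_drop]

theorem zip_starts_shift (K : Nat) (M : List Nat) (L : Nat) :
    (0 :: ((0 :: M).map (· + (K + 1)))).zip ((0 :: M).map (· + (K + 1)) ++ [L + (K + 1)])
      = ((0, K + 1) : Nat × Nat) :: ((0 :: M).zip (M ++ [L])).map
          (Prod.map (· + (K + 1)) (· + (K + 1))) := by
  have h1 : (0 :: M).map (· + (K + 1)) ++ [L + (K + 1)]
      = (K + 1) :: (M ++ [L]).map (· + (K + 1)) := by simp
  rw [h1, List.zip_cons_cons, List.zip_map]

theorem pvZF : ∀ (n : Nat) (l : List String), l.length ≤ n →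
    ∀ (off : Int) (d : PySem.Dict String (Int × Int)),
    ((pvStarts l).zip ((pvStarts l).tail ++ [l.length])).foldl
      (fun (d : PySem.Dict String (Int × Int)) (p : Nat × Nat) =>
        d.insert (l.getD p.1 "") (off + (p.1 : Int), off + (p.2 : Int))) d
    = runFold d off l := by
  intro n
  induction n with
  | zero =>
    intro l hl off d
    have : l = [] := List.eq_nil_of_length_eq_zero (by omega)
    subst this
    simp [pvStarts, runFold]
  | succ n ih =>
    intro l hl off d
    cases l with
    | nil => simp [pvStarts, runFold]
    | cons c t =>
      obtain ⟨K, hK⟩ : ∃ K, (List.takeWhile (fun x => decide (x = c)) t).length = K := ⟨_, rfl⟩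
      obtain ⟨R, hR⟩ : ∃ R, List.dropWhile (fun x => decide (x = c)) t = R := ⟨_, rfl⟩
      have hlen : (c :: t).length = R.length + (K + 1) := by
        have h2 := congrArg List.length
          (List.takeWhile_append_dropWhile (p := fun x => decide (x = c)) (l := t))
        rw [List.length_append, hK, hR] at h2
        simp only [List.length_cons]
        omega
      have hshift : ∀ i : Nat, (c :: t).getD (i + (K + 1)) "" = R.getD i "" := by
        intro i
        have h3 := getD_shift c t i
        rwa [hK, hR] at h3
      have hRle : R.length ≤ n := by
        have h3 := List.length_dropWhile_le (fun x => decide (x = c)) t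
        rw [hR] at h3
        simp only [List.length_cons] at hl
        omega
      rw [pvStarts_runs, runFold, hK, hR, hlen]
      cases R with
      | nil =>
        rw [show pvStarts ([] : List String) = [] from rfl]
        simp only [List.map_nil, List.tail_cons, List.nil_append, List.length_nil,
          Nat.zero_add, List.zip_cons_cons, List.zip_nil_left, List.foldl_cons, List.foldl_nil]
        rw [runFold]
        show d.insert ((c :: t).getD 0 "") (off + ((0 : Nat) : Int), off + (((K + 1 : Nat)) : Int))
            = d.insert c (off, off + 1 + (K : Int))
        rw [List.getD_cons_zero]
        have e1 : off + ((0 : Nat) : Int) = off := by simp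
        have e2 : off + (((K + 1 : Nat)) : Int) = off + 1 + (K : Int) := by push_cast; ring
        rw [e1, e2]
      | cons y ys =>
        rw [← ih (y :: ys) hRle (off + 1 + (K : Int)) (d.insert c (off, off + 1 + (K : Int)))]
        rw [pvStarts_cons y ys, List.tail_cons]
        rw [zip_starts_shift K ((pvAux y ys).map (· + 1)) (y :: ys).length]
        rw [List.foldl_cons, List.foldl_map, List.tail_cons]
        have hfun : (fun (x : PySem.Dict String (Int × Int)) (y : Nat × Nat) =>
              x.insert ((c :: t).getD (Prod.map (fun x => x + (K + 1)) (fun x => x + (K + 1)) y).1 "")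
                (off + ((Prod.map (fun x => x + (K + 1)) (fun x => x + (K + 1)) y).1 : Int),
                 off + ((Prod.map (fun x => x + (K + 1)) (fun x => x + (K + 1)) y).2 : Int)))
            = (fun (d : PySem.Dict String (Int × Int)) (p : Nat × Nat) =>
                d.insert ((y :: ys).getD p.1 "")
                  (off + 1 + (K : Int) + (p.1 : Int), off + 1 + (K : Int) + (p.2 : Int))) := by
          funext acc p
          obtain ⟨p1, p2⟩ := p
          show acc.insert ((c :: t).getD (p1 + (K + 1)) "")
              (off + ((p1 + (K + 1) : Nat) : Int), off + ((p2 + (K + 1) : Nat) : Int))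
            = acc.insert ((y :: ys).getD p1 "")
              (off + 1 + (K : Int) + (p1 : Int), off + 1 + (K : Int) + (p2 : Int))
          rw [hshift p1]
          have e1 : off + ((p1 + (K + 1) : Nat) : Int) = off + 1 + (K : Int) + (p1 : Int) := by
            push_cast; ring
          have e2 : off + ((p2 + (K + 1) : Nat) : Int) = off + 1 + (K : Int) + (p2 : Int) := by
            push_cast; ring
          rw [e1, e2]
        rw [hfun]
        have hb : d.insert ((c :: t).getD ((((0 : Nat), K + 1) : Nat × Nat).1) "")
              (off + (((((0 : Nat), K + 1) : Nat × Nat).1 : Nat) : Int),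
               off + (((((0 : Nat), K + 1) : Nat × Nat).2 : Nat) : Int))
            = d.insert c (off, off + 1 + (K : Int)) := by
          show d.insert ((c :: t).getD 0 "")
              (off + ((0 : Nat) : Int), off + (((K + 1 : Nat)) : Int))
              = d.insert c (off, off + 1 + (K : Int))
          rw [List.getD_cons_zero]
          have e1 : off + ((0 : Nat) : Int) = off := by simp
          have e2 : off + (((K + 1 : Nat)) : Int) = off + 1 + (K : Int) := by push_cast; ring
          rw [e1, e2]
        rw [hb]

-- ===== VERDICT (by name: the statement is the Claim_ definition above) =====
theorem find_string_ranges_py_spec : Claim_equal_find_string_ranges_py := by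
  intro l _
  unfold Spec_find_string_ranges_py find_string_ranges_py_alt
  have hf : (fun (d : PySem.Dict String (Int × Int)) (p : Nat × Nat) =>
        d.insert (l.getD p.1 "") ((p.1 : Int), (p.2 : Int)))
      = (fun (d : PySem.Dict String (Int × Int)) (p : Nat × Nat) =>
        d.insert (l.getD p.1 "") ((0 : Int) + (p.1 : Int), (0 : Int) + (p.2 : Int))) := by
    funext d p; simp
  rw [hf, pvZF l.length l le_rfl 0 PySem.Dict.empty]
  cases l with
  | nil => simp [find_string_ranges_py, runFold]
  | cons s0 rest =>
    simp only [find_string_ranges_py, List.length_cons]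
    have hl : (((rest.length + 1 : Nat)) : Int) = 1 + (rest.length : Int) := by push_cast; ring
    rw [hl, foldA_eq_loopA rest PySem.Dict.empty 0 s0 1]
    have h2 : (1 : Int) = 0 + ((1 : Nat) : Int) := by norm_num
    rw [h2, loopA_eq_runFold]
    rw [runFold]
    norm_num
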